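-- pv_equiv track=rewrite | github.com/eclipse/january | org.eclipse.january/src/org/eclipse/january/dataset/internal/template/generatefunctions.py | parse_b_real
-- ===== SOURCE A (Python) =====
-- def parse_b_real(text):
--     new_text = []
--     text_b_real = []
--     has_b_real = False
--     for t in text:
--         if t.startswith('complex_b_real;'):
--             has_b_real = True
--         elif has_b_real:
--             text_b_real.append(t)
--         else:
--             new_text.append(t)
--
--     return new_text, text_b_real
-- ===== SOURCE B (Python) =====
-- def parse_b_real(text):
--     marker = 'complex_b_real;'
--     i = next((k for k, t in enumerate(text) if t.startswith(marker)), None)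
--     if i is None:
--         return list(text), []
--     return text[:i], [t for t in text[i + 1:] if not t.startswith(marker)]
-- ===== Notes on version B (the rewrite author's own statement) =====
-- stated objective: simpler
-- what changed: Replaces the single-pass flag-state loop by finding the index of the first marker line, slicing the prefix, and filtering marker lines out of the tail.
import Mathlib
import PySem

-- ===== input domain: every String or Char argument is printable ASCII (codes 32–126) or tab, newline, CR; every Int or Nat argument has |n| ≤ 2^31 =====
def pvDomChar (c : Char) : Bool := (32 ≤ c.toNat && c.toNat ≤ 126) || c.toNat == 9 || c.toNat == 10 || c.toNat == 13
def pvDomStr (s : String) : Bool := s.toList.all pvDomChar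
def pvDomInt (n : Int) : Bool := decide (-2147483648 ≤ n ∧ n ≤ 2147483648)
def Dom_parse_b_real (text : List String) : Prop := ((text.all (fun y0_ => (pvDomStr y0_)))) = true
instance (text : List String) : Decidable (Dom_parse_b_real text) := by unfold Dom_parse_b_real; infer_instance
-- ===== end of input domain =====

-- B replaces A's single-pass flag-state loop by find-first-marker-index, slice the prefix, filter the tail (objective: simpler).

-- ===== PORT A =====
-- loop body of A: state = (new_text, text_b_real, has_b_real)
def pvStepA (s : List String × List String × Bool) (t : String) : List String × List String × Bool :=
  if PySem.Str.startswith t "complex_b_real;" then (s.1, s.2.1, true)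
  else if s.2.2 then (s.1, s.2.1 ++ [t], s.2.2)
  else (s.1 ++ [t], s.2.1, s.2.2)

def parse_b_real (text : List String) : List String × List String :=
  let r := text.foldl pvStepA ([], [], false)
  (r.1, r.2.1)

-- ===== PORT B =====
def parse_b_real_alt (text : List String) : List String × List String :=
  match text.findIdx? (fun t => PySem.Str.startswith t "complex_b_real;") with
  | none => (text, [])
  | some i => (text.take i,
      (text.drop (i + 1)).filter (fun t => ! PySem.Str.startswith t "complex_b_real;"))

-- ===== PRECONDITION & SPEC =====
def Spec_parse_b_real (text : List String) (out : List String × List String) : Prop := out = parse_b_real_alt text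
instance (text : List String) (out : List String × List String) : Decidable (Spec_parse_b_real text out) := by unfold Spec_parse_b_real; infer_instance

-- ===== CLAIM (what is proved, stated in full; the proofs are below) =====
def Claim_equal_parse_b_real : Prop := ∀ (text : List String), Dom_parse_b_real text → Spec_parse_b_real text (parse_b_real text)

-- ===== LEMMAS AND PROOFS =====
-- A's loop body with the marker test abstracted (pvStepA = pvStep <marker test>, by rfl)
def pvStep (p : String → Bool) (s : List String × List String × Bool) (t : String) :
    List String × List String × Bool :=
  if p t then (s.1, s.2.1, true)
  else if s.2.2 then (s.1, s.2.1 ++ [t], s.2.2)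
  else (s.1 ++ [t], s.2.1, s.2.2)

lemma pvStepA_eq : pvStepA = pvStep (fun t => PySem.Str.startswith t "complex_b_real;") := rfl

-- once has_b_real is true, the loop only appends the non-marker lines to text_b_real
lemma loop_true (p : String → Bool) (ts : List String) (a b : List String) :
    ts.foldl (pvStep p) (a, b, true) = (a, b ++ ts.filter (fun t => !p t), true) := by
  induction ts generalizing b with
  | nil => simp
  | cons t ts ih =>
      simp only [List.foldl_cons, pvStep, List.filter_cons]
      by_cases h : p t = true <;> simp [h, ih]

-- before the first marker the loop fills new_text; the first marker flips the flag
lemma loop_false (p : String → Bool) (ts : List String) (a : List String) :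
    ts.foldl (pvStep p) (a, [], false) =
      match ts.findIdx? p with
      | none => (a ++ ts, [], false)
      | some i => (a ++ ts.take i, (ts.drop (i + 1)).filter (fun t => !p t), true) := by
  induction ts generalizing a with
  | nil => simp
  | cons t ts ih =>
      simp only [List.foldl_cons, pvStep, List.findIdx?_cons]
      by_cases h : p t = true
      · simp [h, loop_true]
      · simp only [h, Bool.false_eq_true, if_false]
        rw [ih (a ++ [t])]
        cases hf : ts.findIdx? p with
        | none => simp
        | some j => simp [List.take_succ_cons, List.drop_succ_cons]


-- ===== VERDICT (by name: the statement is the Claim_ definition above) =====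
theorem parse_b_real_spec : Claim_equal_parse_b_real := by
  intro text _
  unfold Spec_parse_b_real parse_b_real parse_b_real_alt
  rw [pvStepA_eq, loop_false]
  cases hf : text.findIdx? (fun t => PySem.Str.startswith t "complex_b_real;") <;> simp
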